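-- pv_equiv track=rewrite | github.com/RugileVa/HPV-detekcija | src/HPV4refactored.py | remove_subsets
-- ===== SOURCE A (Python) =====
-- def remove_subsets(probes):
--     result_probes = []
--
--     for i, probe_i in enumerate(probes):
--         is_subset = False
--
--         for j, probe_j in enumerate(probes):
--             if i != j and set(probe_i[1]).issubset(set(probe_j[1])):
--                 is_subset = True
--                 break
--
--         if not is_subset:
--             result_probes.append(probe_i)
--
--     return result_probes
-- ===== SOURCE B (Python) =====
-- def remove_subsets(probes):
--     # Inverted index: element value -> set of probe indices whose element set contains it.
--     index = {}
--     for j, probe in enumerate(probes):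
--         for e in set(probe[1]):
--             index.setdefault(e, set()).add(j)
--
--     universe = set(range(len(probes)))
--     result = []
--     for i, probe in enumerate(probes):
--         # candidate supersets of probe i: intersect posting sets (empty set -> universe)
--         cand = universe
--         for e in set(probe[1]):
--             cand = cand & index[e]
--         if cand <= {i}:  # no OTHER probe's set contains this probe's set
--             result.append(probe)
--     return result
-- ===== Notes on version B (the rewrite author's own statement) =====
-- stated objective: faster
-- what changed: Replaces the all-pairs issubset rescan with an inverted index (element -> set of probe indices), deciding each probe by intersecting the posting sets of its elements instead of comparing its set against every other probe's set.
import Mathlib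
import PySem

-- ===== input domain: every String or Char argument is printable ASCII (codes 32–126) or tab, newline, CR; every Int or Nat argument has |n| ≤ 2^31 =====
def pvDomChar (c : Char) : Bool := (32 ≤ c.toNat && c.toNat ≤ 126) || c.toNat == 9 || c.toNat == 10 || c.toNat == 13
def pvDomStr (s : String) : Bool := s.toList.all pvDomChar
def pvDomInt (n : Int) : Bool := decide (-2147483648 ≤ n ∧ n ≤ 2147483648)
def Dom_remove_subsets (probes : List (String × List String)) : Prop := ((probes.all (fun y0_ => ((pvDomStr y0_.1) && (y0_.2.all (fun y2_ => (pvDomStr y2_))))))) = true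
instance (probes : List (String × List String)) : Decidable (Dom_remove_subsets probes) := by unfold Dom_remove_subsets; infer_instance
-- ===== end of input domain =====

-- B replaces A's all-pairs issubset rescan by an inverted index (element -> set of probe
-- indices) and posting-set intersections; objective: alternative algorithm, same results.


-- ===== PORT A =====
-- for i, probe_i in enumerate(probes): is_subset = any(i != j and set issubset); append if not
def remove_subsets (probes : List (String × List String)) : List (String × List String) :=
  (PySem.List.enumerate probes).foldl
    (fun result_probes ip =>
      let is_subset :=
        (PySem.List.enumerate probes).any
          (fun jp => decide (ip.1 ≠ jp.1) &&
            PySem.Set.issubset (PySem.Set.ofList ip.2.2) (PySem.Set.ofList jp.2.2))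
      if is_subset then result_probes else result_probes ++ [ip.2])
    []

-- ===== PORT B =====
-- index.setdefault(e, set()).add(j) for every e in set(probe[1])
def rsIndex (probes : List (String × List String)) : PySem.Dict String (PySem.Set Int) :=
  (PySem.List.enumerate probes).foldl
    (fun index jp =>
      (PySem.Set.ofList jp.2.2).foldl
        (fun index e => index.insert e (PySem.Set.add (index.getD e PySem.Set.empty) jp.1))
        index)
    PySem.Dict.empty

def remove_subsets_alt (probes : List (String × List String)) : List (String × List String) :=
  let index := rsIndex probes
  let univ : PySem.Set Int := PySem.Set.ofList (PySem.List.pyRange 0 (probes.length : Int))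
  (PySem.List.enumerate probes).foldl
    (fun result ip =>
      -- index[e] never misses (e stems from probe ip itself), so getD's default is unreachable
      let cand := (PySem.Set.ofList ip.2.2).foldl
        (fun cand e => PySem.Set.inter cand (index.getD e PySem.Set.empty)) univ
      if PySem.Set.issubset cand (PySem.Set.ofList [ip.1]) then result ++ [ip.2] else result)
    []

-- ===== PRECONDITION & SPEC =====
def Spec_remove_subsets (probes : List (String × List String)) (out : List (String × List String)) : Prop := out = remove_subsets_alt probes
instance (probes : List (String × List String)) (out : List (String × List String)) : Decidable (Spec_remove_subsets probes out) := by unfold Spec_remove_subsets; infer_instance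

-- ===== CLAIM (what is proved, stated in full; the proofs are below) =====
def Claim_equal_remove_subsets : Prop := ∀ (probes : List (String × List String)), Dom_remove_subsets probes → Spec_remove_subsets probes (remove_subsets probes)

-- ===== LEMMAS AND PROOFS =====

-- membership in enumerate, with an arbitrary start offset
theorem rs_mem_enumerate {α : Type} (xs : List α) (s : Int) (j : Int) (p : α) :
    (j, p) ∈ PySem.List.enumerate xs s ↔
      ∃ k : Nat, ∃ h : k < xs.length, j = s + k ∧ xs[k] = p := by
  induction xs generalizing s with
  | nil => simp [PySem.List.enumerate]
  | cons x t ih =>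
    simp only [PySem.List.enumerate, List.mem_cons, ih, Prod.mk.injEq]
    constructor
    · rintro (⟨rfl, rfl⟩ | ⟨k, hk, rfl, rfl⟩)
      · exact ⟨0, by simp, by simp⟩
      · refine ⟨k + 1, by simp [List.length_cons]; omega, ?_, by simp⟩
        push_cast; ring
    · rintro ⟨k, hk, rfl, rfl⟩
      cases k with
      | zero => left; simp
      | succ k =>
        right
        refine ⟨k, by simp [List.length_cons] at hk; omega, ?_, by simp⟩
        push_cast; ring

-- inner loop of rsIndex: what lands in posting list e
theorem rs_inner_mem (ls : List String) (d : PySem.Dict String (PySem.Set Int)) (j : Int)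
    (e : String) (x : Int) :
    x ∈ (ls.foldl (fun d e => d.insert e (PySem.Set.add (d.getD e PySem.Set.empty) j)) d).getD
        e PySem.Set.empty ↔
      x ∈ d.getD e PySem.Set.empty ∨ (e ∈ ls ∧ x = j) := by
  induction ls generalizing d with
  | nil => simp
  | cons a t ih =>
    simp only [List.foldl_cons, ih, PySem.Dict.getD_insert, List.mem_cons]
    by_cases h : e = a
    · subst h; simp [PySem.Set.mem_add]; try tauto
    · simp [h]; try tauto

-- posting lists of rsIndex (generalized over start offset and accumulator)
theorem rs_index_inv (l : List (String × List String)) (s : Int)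
    (d : PySem.Dict String (PySem.Set Int)) (e : String) (x : Int) :
    x ∈ ((PySem.List.enumerate l s).foldl
        (fun index jp =>
          (PySem.Set.ofList jp.2.2).foldl
            (fun index e => index.insert e (PySem.Set.add (index.getD e PySem.Set.empty) jp.1))
            index) d).getD e PySem.Set.empty ↔
      x ∈ d.getD e PySem.Set.empty ∨
        ∃ k : Nat, ∃ h : k < l.length, x = s + k ∧ e ∈ l[k].2 := by
  induction l generalizing s d with
  | nil => simp [PySem.List.enumerate]
  | cons p t ih =>
    simp only [PySem.List.enumerate, List.foldl_cons, ih, rs_inner_mem, PySem.Set.mem_ofList]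
    constructor
    · rintro ((h | ⟨he, rfl⟩) | ⟨k, hk, rfl, hm⟩)
      · exact Or.inl h
      · exact Or.inr ⟨0, by simp, by simp, by simpa using he⟩
      · exact Or.inr ⟨k + 1, by simp [List.length_cons]; omega,
          by push_cast; ring, by simpa using hm⟩
    · rintro (h | ⟨k, hk, rfl, hm⟩)
      · exact Or.inl (Or.inl h)
      · cases k with
        | zero => exact Or.inl (Or.inr ⟨by simpa using hm, by simp⟩)
        | succ k =>
          exact Or.inr ⟨k, by simp [List.length_cons] at hk; omega,
            by push_cast; ring, by simpa using hm⟩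

theorem rs_index_mem (probes : List (String × List String)) (e : String) (x : Int) :
    x ∈ (rsIndex probes).getD e PySem.Set.empty ↔
      ∃ k : Nat, ∃ h : k < probes.length, x = k ∧ e ∈ probes[k].2 := by
  unfold rsIndex
  rw [rs_index_inv]
  simp [PySem.Dict.empty, PySem.Dict.getD, PySem.Dict.get?]

-- fold of intersections = membership in seed and in every posting set
theorem rs_inter_fold_mem {α : Type} [BEq α] [LawfulBEq α] (ls : List String)
    (g : String → PySem.Set α) (c : PySem.Set α) (x : α) :
    x ∈ ls.foldl (fun c e => PySem.Set.inter c (g e)) c ↔ x ∈ c ∧ ∀ e ∈ ls, x ∈ g e := by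
  induction ls generalizing c with
  | nil => simp
  | cons a t ih =>
    simp only [List.foldl_cons, ih, PySem.Set.mem_inter, List.mem_cons]
    constructor
    · rintro ⟨⟨hc, hg⟩, h⟩
      refine ⟨hc, ?_⟩
      intro e he
      rcases he with rfl | he'
      · exact hg
      · exact h e he'
    · rintro ⟨hc, h⟩
      exact ⟨⟨hc, h a (Or.inl rfl)⟩, fun e he => h e (Or.inr he)⟩

-- the per-probe decisions of A and B agree
theorem rs_cond_eq (probes : List (String × List String)) (i : Int)
    (p : String × List String) :
    ((PySem.List.enumerate probes).any
        (fun jp => decide (i ≠ jp.1) &&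
          PySem.Set.issubset (PySem.Set.ofList p.2) (PySem.Set.ofList jp.2.2)))
      = !(PySem.Set.issubset
          ((PySem.Set.ofList p.2).foldl
            (fun cand e => PySem.Set.inter cand ((rsIndex probes).getD e PySem.Set.empty))
            (PySem.Set.ofList (PySem.List.pyRange 0 (probes.length : Int))))
          (PySem.Set.ofList [i])) := by
  have hA : ((PySem.List.enumerate probes).any
        (fun jp => decide (i ≠ jp.1) &&
          PySem.Set.issubset (PySem.Set.ofList p.2) (PySem.Set.ofList jp.2.2))) = true ↔
      ∃ k : Nat, ∃ h : k < probes.length, (k : Int) ≠ i ∧ ∀ e ∈ p.2, e ∈ probes[k].2 := by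
    simp only [List.any_eq_true]
    constructor
    · rintro ⟨⟨j, q⟩, hjq, hcond⟩
      simp only [Bool.and_eq_true, decide_eq_true_eq, PySem.Set.issubset_iff,
        PySem.Set.mem_ofList] at hcond
      rcases (rs_mem_enumerate probes 0 j q).1 hjq with ⟨k, hk, rfl, rfl⟩
      exact ⟨k, hk, by omega, hcond.2⟩
    · rintro ⟨k, hk, hne, hsub⟩
      refine ⟨((k : Int), probes[k]), (rs_mem_enumerate probes 0 _ _).2 ⟨k, hk, by omega, rfl⟩, ?_⟩
      simp only [Bool.and_eq_true, decide_eq_true_eq, PySem.Set.issubset_iff,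
        PySem.Set.mem_ofList]
      exact ⟨by omega, hsub⟩
  have hB : (PySem.Set.issubset
        ((PySem.Set.ofList p.2).foldl
          (fun cand e => PySem.Set.inter cand ((rsIndex probes).getD e PySem.Set.empty))
          (PySem.Set.ofList (PySem.List.pyRange 0 (probes.length : Int))))
        (PySem.Set.ofList [i])) = true ↔
      ¬ ∃ k : Nat, ∃ h : k < probes.length, (k : Int) ≠ i ∧ ∀ e ∈ p.2, e ∈ probes[k].2 := by
    rw [PySem.Set.issubset_iff]
    constructor
    · rintro hall ⟨k, hk, hne, hsub⟩
      have hx : (k : Int) ∈ (PySem.Set.ofList p.2).foldl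
          (fun cand e => PySem.Set.inter cand ((rsIndex probes).getD e PySem.Set.empty))
          (PySem.Set.ofList (PySem.List.pyRange 0 (probes.length : Int))) := by
        rw [rs_inter_fold_mem]
        refine ⟨by simp [PySem.Set.mem_ofList, PySem.List.mem_pyRange_one]; omega, ?_⟩
        intro e he
        rw [rs_index_mem]
        exact ⟨k, hk, rfl, hsub e (by simpa [PySem.Set.mem_ofList] using he)⟩
      have := hall _ hx
      simp [PySem.Set.mem_ofList] at this
      exact hne this
    · intro hnone x hx
      rw [rs_inter_fold_mem] at hx
      obtain ⟨hu, hpost⟩ := hx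
      simp only [PySem.Set.mem_ofList, PySem.List.mem_pyRange_one] at hu
      simp only [PySem.Set.mem_ofList, List.mem_singleton]
      by_contra hxi
      rcases p.2.eq_nil_or_concat' with h2 | hcc
      · -- empty element list: the candidate set is the whole universe
        refine hnone ⟨x.toNat, by omega, by omega, ?_⟩
        intro e he; rw [h2] at he; cases he
      · have hse : ∃ e, e ∈ p.2 := by
          obtain ⟨L, b, hLb⟩ := hcc
          exact ⟨b, by simp [hLb]⟩
        obtain ⟨e0, he0⟩ := hse
        have := hpost e0 (by simpa [PySem.Set.mem_ofList] using he0)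
        rw [rs_index_mem] at this
        obtain ⟨k, hk, rfl, _⟩ := this
        refine hnone ⟨k, hk, by omega, ?_⟩
        intro e he
        have := hpost e (by simpa [PySem.Set.mem_ofList] using he)
        rw [rs_index_mem] at this
        obtain ⟨k', hk', hkk, hmem'⟩ := this
        have : k' = k := by omega
        subst this
        exact hmem'
  rcases hb : (PySem.Set.issubset
        ((PySem.Set.ofList p.2).foldl
          (fun cand e => PySem.Set.inter cand ((rsIndex probes).getD e PySem.Set.empty))
          (PySem.Set.ofList (PySem.List.pyRange 0 (probes.length : Int))))
        (PySem.Set.ofList [i])) with _ | _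
  · simp only [Bool.not_false]
    rw [hA]
    rw [hb] at hB
    simpa using (not_iff_not.mpr hB).1 (by simp)
  · simp only [Bool.not_true]
    rw [hb] at hB
    have := hB.1 rfl
    simp only [Bool.eq_false_iff, Ne, hA]
    tauto

-- ===== VERDICT (by name: the statement is the Claim_ definition above) =====
theorem remove_subsets_spec : Claim_equal_remove_subsets := by
  intro probes _
  unfold Spec_remove_subsets remove_subsets remove_subsets_alt
  dsimp only
  apply Eq.symm
  apply PySem.List.foldl_congr_mem
  intro acc ip _
  have hc := rs_cond_eq probes ip.1 ip.2
  rw [hc]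
  cases hb : (PySem.Set.issubset
      ((PySem.Set.ofList ip.2.2).foldl
        (fun cand e => PySem.Set.inter cand ((rsIndex probes).getD e PySem.Set.empty))
        (PySem.Set.ofList (PySem.List.pyRange 0 (probes.length : Int))))
      (PySem.Set.ofList [ip.1])) <;> simp
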